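-- pv_equiv track=rewrite | github.com/ncs4devs/ncs4-custom-blocks | compressPlugin.py | tokenizeArgs
-- ===== SOURCE A (Python) =====
-- def tokenizeArgs(args, flags):
--     tokens = []
--     i = 1 # arg 0 is the program name
--     while i < len(args):
--         if args[i] in flags.values():
--             if i + 1 < len(args):
--                 tokens.append({ "flag": args[i], "arg": args[i+1] })
--             else:
--                 raise SyntaxError(
--                     "Argument expected for option '" + args[i] + "'"
--                 )
--             i += 1
--         else:
--             tokens.append({ "flag": None, "arg": args[i] })
--         i += 1
--     return tokens
-- ===== SOURCE B (Python) =====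
-- def tokenizeArgs(args, flags):
--     # One-state Moore machine: no index arithmetic and no lookahead; a seen flag is
--     # carried as `pending` and closed by the NEXT element; a dangling flag is reported
--     # after the pass (same SyntaxError message as the original).
--     wanted = frozenset(flags.values())
--     pending = None
--     tokens = []
--     for a in args[1:]:
--         if pending is not None:
--             tokens.append({"flag": pending, "arg": a})
--             pending = None
--         elif a in wanted:
--             pending = a
--         else:
--             tokens.append({"flag": None, "arg": a})
--     if pending is not None:
--         raise SyntaxError("Argument expected for option '" + pending + "'")
--     return tokens
-- ===== Notes on version B (the rewrite author's own statement) =====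
-- stated objective: alternative
-- what changed: Replaces the index-driven lookahead loop (peek args[i+1], skip two, raise immediately, rescan flags.values() each step) with a one-state Moore machine: a single fold over args[1:] carrying a pending-flag state that the next element closes, a frozenset of flag values built once, and the dangling-flag SyntaxError raised after the pass.
import Mathlib
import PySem

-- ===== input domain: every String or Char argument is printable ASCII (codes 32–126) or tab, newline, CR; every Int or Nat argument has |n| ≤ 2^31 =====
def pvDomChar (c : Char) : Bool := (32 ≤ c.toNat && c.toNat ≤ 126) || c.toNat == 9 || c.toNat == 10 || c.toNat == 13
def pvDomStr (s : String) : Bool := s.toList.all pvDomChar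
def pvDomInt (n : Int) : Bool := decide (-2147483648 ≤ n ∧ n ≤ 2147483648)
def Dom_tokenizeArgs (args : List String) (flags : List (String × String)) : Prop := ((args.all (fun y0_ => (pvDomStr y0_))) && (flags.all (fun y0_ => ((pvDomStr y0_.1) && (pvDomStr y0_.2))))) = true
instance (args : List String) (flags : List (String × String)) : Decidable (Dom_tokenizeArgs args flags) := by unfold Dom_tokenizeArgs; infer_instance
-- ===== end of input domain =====

-- B replaces A's index-driven lookahead loop with a one-state Moore machine (a fold over args[1:]
-- carrying a pending flag that the next element closes, flag values as a set built once);
-- equivalence is about the return value.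

-- ===== PORT A =====
-- A's while loop over index i, accumulating tokens; the SyntaxError branch (flag at the very end)
-- is excluded by Pre_tokenizeArgs, the port returns the tokens accumulated so far there.
def tokALoop (args vals : List String) (i : Nat) (tokens : List (List (String × Option String))) :
    List (List (String × Option String)) :=
  if _h : i < args.length then
    if vals.contains (args.getD i "") then
      if i + 1 < args.length then
        tokALoop args vals (i + 2)
          (tokens ++ [[("flag", some (args.getD i "")), ("arg", some (args.getD (i + 1) ""))]])
      else
        tokens  -- raise SyntaxError (excluded by Pre_tokenizeArgs)
    else
      tokALoop args vals (i + 1) (tokens ++ [[("flag", none), ("arg", some (args.getD i ""))]])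
  else
    tokens
termination_by args.length - i

def tokenizeArgs (args : List String) (flags : List (String × String)) :
    List (List (String × Option String)) :=
  tokALoop args ((PySem.Dict.ofList flags).values) 1 []

-- ===== PORT B =====
-- Source B's per-element step of the Moore machine: state = (pending flag, tokens so far).
def tokBStep (wanted : PySem.Set String)
    (st : Option String × List (List (String × Option String))) (a : String) :
    Option String × List (List (String × Option String)) :=
  match st with
  | (some p, toks) => (none, toks ++ [[("flag", some p), ("arg", some a)]])
  | (none, toks) =>
    if PySem.Set.contains wanted a then (some a, toks)
    else (none, toks ++ [[("flag", none), ("arg", some a)]])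

def tokenizeArgs_alt (args : List String) (flags : List (String × String)) :
    List (List (String × Option String)) :=
  let st := (args.drop 1).foldl
      (tokBStep (PySem.Set.ofList ((PySem.Dict.ofList flags).values))) (none, [])
  -- a pending flag left at the end raises SyntaxError (excluded by Pre_tokenizeArgs);
  -- the port returns the tokens accumulated so far there
  st.2

-- ===== PRECONDITION & SPEC =====
-- Every flag value occurring (in flag position) in args[1:] is followed by an argument.
def wfArgs (vals : List String) : List String → Bool
  | [] => true
  | [x] => !vals.contains x
  | x :: y :: rest => if vals.contains x then wfArgs vals rest else wfArgs vals (y :: rest)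

-- Pre_ excludes exactly the inputs on which Python A raises SyntaxError (a flag value in flag
-- position with no following argument); Python B raises the same SyntaxError there.
def Pre_tokenizeArgs (args : List String) (flags : List (String × String)) : Prop :=
  wfArgs ((PySem.Dict.ofList flags).values) (args.drop 1) = true
instance (args : List String) (flags : List (String × String)) : Decidable (Pre_tokenizeArgs args flags) := by
  unfold Pre_tokenizeArgs; infer_instance

def pvWitness_tokenizeArgs : List String × (List (String × String)) :=
  (["prog", "-f", "out.txt", "input"], [("f", "-f")])

def Spec_tokenizeArgs (args : List String) (flags : List (String × String)) (out : List (List (String × Option String))) : Prop := out = tokenizeArgs_alt args flags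
instance (args : List String) (flags : List (String × String)) (out : List (List (String × Option String))) : Decidable (Spec_tokenizeArgs args flags out) := by unfold Spec_tokenizeArgs; infer_instance

-- ===== CLAIM (what is proved, stated in full; the proofs are below) =====
def Claim_equal_tokenizeArgs : Prop := ∀ (args : List String) (flags : List (String × String)), Dom_tokenizeArgs args flags → Pre_tokenizeArgs args flags → Spec_tokenizeArgs args flags (tokenizeArgs args flags)

-- ===== LEMMAS AND PROOFS =====

-- Common recursive characterisation of both loops (proof-only; its "raise" branches return []).
def goTok (vals : List String) : List String → List (List (String × Option String))
  | [] => []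
  | x :: rest =>
    if vals.contains x then
      match rest with
      | [] => []  -- raise branch
      | y :: r => [("flag", some x), ("arg", some y)] :: goTok vals r
    else
      [("flag", none), ("arg", some x)] :: goTok vals rest

-- A's loop from index i equals tokens ++ goTok on args.drop i.
theorem tokALoop_eq (args vals : List String) :
    ∀ (i : Nat) (tokens : List (List (String × Option String))),
      tokALoop args vals i tokens = tokens ++ goTok vals (args.drop i) := by
  intro i tokens
  induction i, tokens using tokALoop.induct args vals with
  | case1 i tokens h hc h2 ih =>
    rw [tokALoop]
    simp only [h, dif_pos, hc, if_true, h2]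
    rw [ih]
    have hd : args.drop i = args.getD i "" :: args.getD (i+1) "" :: args.drop (i+2) := by
      rw [List.getD_eq_getElem?_getD, List.getD_eq_getElem?_getD,
          List.getElem?_eq_getElem h, List.getElem?_eq_getElem h2]
      simp only [Option.getD_some]
      rw [List.drop_eq_getElem_cons h]
      congr 1
      rw [List.drop_eq_getElem_cons h2]
    have hm : args.getD i "" ∈ vals := by simpa using hc
    rw [List.getD_eq_getElem?_getD] at hm
    rw [hd]
    conv_rhs => rw [goTok.eq_def]
    simp [hm]
  | case2 i tokens h hc h2 =>
    rw [tokALoop]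
    simp only [h, dif_pos, hc, if_true, h2]
    have hd : args.drop i = [args.getD i ""] := by
      rw [List.getD_eq_getElem?_getD, List.getElem?_eq_getElem h]
      simp only [Option.getD_some]
      rw [List.drop_eq_getElem_cons h]
      have : args.drop (i+1) = [] := List.drop_eq_nil_of_le (by omega)
      rw [this]
    have hm : args.getD i "" ∈ vals := by simpa using hc
    rw [List.getD_eq_getElem?_getD] at hm
    rw [hd]
    conv_rhs => rw [goTok.eq_def]
    simp [hm]
  | case3 i tokens h hc ih =>
    rw [tokALoop]
    simp only [h, dif_pos, hc]
    rw [ih]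
    have hd : args.drop i = args.getD i "" :: args.drop (i+1) := by
      rw [List.getD_eq_getElem?_getD, List.getElem?_eq_getElem h]
      simp only [Option.getD_some]
      exact List.drop_eq_getElem_cons h
    have hm : args.getD i "" ∉ vals := by simpa using hc
    rw [List.getD_eq_getElem?_getD] at hm
    rw [hd]
    conv_rhs => rw [goTok.eq_def]
    simp [hm]
  | case4 i tokens h =>
    rw [tokALoop]
    simp only [h, dif_neg, not_false_iff]
    rw [List.drop_eq_nil_of_le (by omega)]
    simp [goTok]

-- B's fold from state (none, toks) equals toks ++ goTok (the dangling pending flag, if any,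
-- contributes nothing to .2, matching A's raise-branch truncation).
theorem tokBFold_eq (vals : List String) :
    ∀ (l : List String) (toks : List (List (String × Option String))),
      (l.foldl (tokBStep (PySem.Set.ofList vals)) (none, toks)).2 = toks ++ goTok vals l := by
  intro l
  induction l using goTok.induct vals with
  | case1 => intro toks; simp [goTok]
  | case2 x hc =>
    intro toks
    have hx : x ∈ vals := by simpa using hc
    rw [goTok.eq_def]
    simp [tokBStep, hx]
  | case3 x hc y r ih =>
    intro toks
    have hx : x ∈ vals := by simpa using hc
    have hc' : PySem.Set.contains (PySem.Set.ofList vals) x = true := by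
      rw [PySem.Set.contains_iff, PySem.Set.mem_ofList]
      exact hx
    simp only [List.foldl_cons, tokBStep, hc', if_true]
    rw [ih]
    conv_rhs => rw [goTok.eq_def]
    simp [hx]
  | case4 x r hc ih =>
    intro toks
    have hx : x ∉ vals := by simpa using hc
    have hc' : PySem.Set.contains (PySem.Set.ofList vals) x = false := by
      rw [Bool.eq_false_iff]
      intro hh
      rw [PySem.Set.contains_iff, PySem.Set.mem_ofList] at hh
      exact hx hh
    simp only [List.foldl_cons, tokBStep, hc', Bool.false_eq_true, if_false]
    rw [ih]
    conv_rhs => rw [goTok.eq_def]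
    simp [hx]

-- ===== VERDICT (by name: the statement is the Claim_ definition above) =====
theorem tokenizeArgs_spec : Claim_equal_tokenizeArgs := by
  intro args flags _ _
  unfold Spec_tokenizeArgs tokenizeArgs tokenizeArgs_alt
  rw [tokALoop_eq, tokBFold_eq]
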